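-- pv_equiv track=rewrite | github.com/nexemjail/vector_calculator | simp/lab2.py | get_next_element_index_in_cube
-- ===== SOURCE A (Python) =====
-- FUNCTION_INDICES_MAPPING = {
--     0: [1, 2, 8],
--     1: [3, 9],
--     2: [5, 6, 10],
--     3: [4, 7, 10, 11],
--     4: [9, 11, 12],
--     5: [8, 12, 13],
-- }
--
-- def get_next_element_index_in_cube(current_index):
--     current_index_in_schema = current_index + 7
--     path_blocks = dict(
--         filter(lambda kv: current_index_in_schema in kv[1],
--                FUNCTION_INDICES_MAPPING.items()))
--
--     for block_index, in_out_indices in path_blocks.items():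
--         if current_index_in_schema in in_out_indices[:-1]:
--             return in_out_indices[-1] - 7
-- ===== SOURCE B (Python) =====
-- FUNCTION_INDICES_MAPPING = {
--     0: [1, 2, 8],
--     1: [3, 9],
--     2: [5, 6, 10],
--     3: [4, 7, 10, 11],
--     4: [9, 11, 12],
--     5: [8, 12, 13],
-- }
--
-- # Inverse lookup built once: each non-last element of a block maps to that
-- # block's last element minus 7.
-- _NEXT_IN_CUBE = {}
-- for _indices in FUNCTION_INDICES_MAPPING.values():
--     for _k in _indices[:-1]:
--         _NEXT_IN_CUBE[_k] = _indices[-1] - 7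
--
--
-- def get_next_element_index_in_cube(current_index):
--     return _NEXT_IN_CUBE.get(current_index + 7)
-- ===== Notes on version B (the rewrite author's own statement) =====
-- stated objective: simpler
-- what changed: Replaces the per-call filter over the mapping plus a scan with a membership branch by a single O(1) lookup in an inverse dict (non-last element -> block's last element minus 7) precomputed once at module load.
import Mathlib
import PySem

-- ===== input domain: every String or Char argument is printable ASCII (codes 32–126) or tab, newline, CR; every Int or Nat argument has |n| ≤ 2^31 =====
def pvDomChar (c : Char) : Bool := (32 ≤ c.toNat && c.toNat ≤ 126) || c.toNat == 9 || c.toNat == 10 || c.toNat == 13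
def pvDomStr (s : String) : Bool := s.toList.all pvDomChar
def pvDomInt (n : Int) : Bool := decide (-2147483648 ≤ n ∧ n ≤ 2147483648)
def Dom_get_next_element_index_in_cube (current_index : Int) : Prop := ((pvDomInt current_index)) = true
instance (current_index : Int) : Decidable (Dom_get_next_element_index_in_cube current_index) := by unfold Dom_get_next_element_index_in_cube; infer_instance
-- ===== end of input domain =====

-- B replaces the per-call filter+scan over the table by one lookup in a precomputed inverse dict (simpler).

-- ===== PORT A =====
def FUNCTION_INDICES_MAPPING : PySem.Dict Int (List Int) :=
  PySem.Dict.ofList [(0, [1, 2, 8]), (1, [3, 9]), (2, [5, 6, 10]),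
                     (3, [4, 7, 10, 11]), (4, [9, 11, 12]), (5, [8, 12, 13])]

def get_next_element_index_in_cube (current_index : Int) : Option Int :=
  let current_index_in_schema := current_index + 7
  let path_blocks : PySem.Dict Int (List Int) :=
    PySem.Dict.ofList
      (FUNCTION_INDICES_MAPPING.items.filter
        (fun kv => decide (current_index_in_schema ∈ kv.2)))
  -- the for-loop with early return; in_out_indices[-1] cannot raise here (every
  -- kv.2 passed the filter, hence is nonempty), so pyGetD's default is unreachable
  path_blocks.items.findSome? (fun kv =>
    if current_index_in_schema ∈ PySem.List.slice kv.2 none (some (-1)) then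
      some (PySem.List.pyGetD kv.2 (-1) 0 - 7)
    else none)

-- ===== PORT B =====
-- inverse dict built once at module load (Source B's nested for-loops)
def NEXT_IN_CUBE : PySem.Dict Int Int :=
  FUNCTION_INDICES_MAPPING.values.foldl
    (fun d indices =>
      (PySem.List.slice indices none (some (-1))).foldl
        (fun d k => d.insert k (PySem.List.pyGetD indices (-1) 0 - 7)) d)
    PySem.Dict.empty

def get_next_element_index_in_cube_alt (current_index : Int) : Option Int :=
  NEXT_IN_CUBE.get? (current_index + 7)

-- ===== PRECONDITION & SPEC =====
def Spec_get_next_element_index_in_cube (current_index : Int) (out : Option Int) : Prop := out = get_next_element_index_in_cube_alt current_index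
instance (current_index : Int) (out : Option Int) : Decidable (Spec_get_next_element_index_in_cube current_index out) := by unfold Spec_get_next_element_index_in_cube; infer_instance

-- ===== CLAIM (what is proved, stated in full; the proofs are below) =====
def Claim_equal_get_next_element_index_in_cube : Prop := ∀ (current_index : Int), Dom_get_next_element_index_in_cube current_index → Spec_get_next_element_index_in_cube current_index (get_next_element_index_in_cube current_index)

-- ===== LEMMAS AND PROOFS =====
theorem pv_out_of_range (c : Int) (h : ¬ (-6 ≤ c ∧ c ≤ 6)) :
    get_next_element_index_in_cube c = get_next_element_index_in_cube_alt c := by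
  have hfilter : FUNCTION_INDICES_MAPPING.items.filter (fun kv => decide ((c + 7) ∈ kv.2)) = [] := by
    have hi : FUNCTION_INDICES_MAPPING.items =
        [(0, [1, 2, 8]), (1, [3, 9]), (2, [5, 6, 10]),
         (3, [4, 7, 10, 11]), (4, [9, 11, 12]), (5, [8, 12, 13])] := by decide
    rw [hi]; simp; omega
  have hA : get_next_element_index_in_cube c = none := by
    simp only [get_next_element_index_in_cube, hfilter]
    rfl
  have hB : get_next_element_index_in_cube_alt c = none := by
    have hk : NEXT_IN_CUBE.keys = [1, 2, 3, 5, 6, 4, 7, 10, 9, 11, 8, 12] := by decide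
    simp only [get_next_element_index_in_cube_alt]
    rw [PySem.Dict.get?_eq_none_iff_not_mem_keys, hk]
    simp
    omega
  rw [hA, hB]

-- ===== VERDICT (by name: the statement is the Claim_ definition above) =====
theorem get_next_element_index_in_cube_spec : Claim_equal_get_next_element_index_in_cube := by
  intro c _
  unfold Spec_get_next_element_index_in_cube
  by_cases h : -6 ≤ c ∧ c ≤ 6
  · obtain ⟨h1, h2⟩ := h
    interval_cases c <;> decide
  · exact pv_out_of_range c h
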